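-- pv_equiv track=rewrite | github.com/Vincent-devSG/AdventOfCode2023 | d9/d9.py | search_zeros
-- ===== SOURCE A (Python) =====
-- def search_zeros(numbers: list) -> list:
--
-- 	line = []
-- 	new = []
--
-- 	line.append(numbers[-1])
--
-- 	for i in range(len(line[-1]) - 1):
-- 		new.append(int(line[-1][i+1]) - int(line[-1][i]))
--
-- 	if all(num ==0 for num in line[-1]):
-- 		return numbers
--
-- 	else:
-- 		numbers.append(new)
-- 		return search_zeros(numbers)
-- ===== SOURCE B (Python) =====
-- def search_zeros(numbers: list) -> list:
--     # while loop mutating numbers in place (same mutation as A); diff rows via zip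
--     while not all(num == 0 for num in numbers[-1]):
--         last = numbers[-1]
--         numbers.append([b - a for a, b in zip(last, last[1:])])
--     return numbers
-- ===== Notes on version B (the rewrite author's own statement) =====
-- stated objective: idiomatic
-- what changed: Replaced the tail recursion with an in-place while loop and the index-based diff construction with a zip of the row against its own tail.
import Mathlib
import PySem

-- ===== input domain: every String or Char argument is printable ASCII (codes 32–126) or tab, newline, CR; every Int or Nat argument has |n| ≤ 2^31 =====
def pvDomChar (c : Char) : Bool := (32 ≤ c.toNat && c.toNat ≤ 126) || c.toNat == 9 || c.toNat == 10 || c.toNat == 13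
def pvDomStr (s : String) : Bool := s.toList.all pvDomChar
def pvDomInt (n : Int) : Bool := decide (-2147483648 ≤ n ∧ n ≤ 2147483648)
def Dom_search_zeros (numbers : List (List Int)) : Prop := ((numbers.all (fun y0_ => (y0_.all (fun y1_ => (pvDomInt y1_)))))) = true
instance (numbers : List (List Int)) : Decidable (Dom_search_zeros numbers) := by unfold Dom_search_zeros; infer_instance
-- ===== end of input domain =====

-- B replaces A's tail recursion by an in-place while loop and builds each diff row by zipping the
-- row with its own tail (idiomatic; same cost). Both Pythons mutate `numbers` in place; the
-- equivalence proved here is about the return value.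

-- ===== PORT A =====
-- A: line[-1] is always numbers[-1]; on numbers = [] Python raises IndexError (outside Pre_),
-- here getLast? = none and we return numbers. The for-loop appending diffs is the foldl; int() is
-- the identity on Int; pyGetD's default is never used (indices are in range).
def search_zeros (numbers : List (List Int)) : List (List Int) :=
  match h : numbers.getLast? with
  | none => numbers
  | some line =>
    let new := (PySem.List.pyRange 0 ((line.length : Int) - 1) 1).foldl
      (fun acc i => acc ++ [PySem.List.pyGetD line (i + 1) 0 - PySem.List.pyGetD line i 0]) []
    if line.all (fun num => num == 0) then numbers
    else search_zeros (numbers ++ [new])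
termination_by (numbers.getLast?.getD []).length
decreasing_by
  have hne : line ≠ [] := by rintro rfl; simp_all
  have h1 : 1 ≤ line.length := List.length_pos_of_ne_nil hne
  have hcast : ((line.length : Int) - 1) = ((line.length - 1 : Nat) : Int) := by omega
  simp only [List.getLast?_append, List.getLast?_singleton, Option.some_or, Option.getD_some, h,
    PySem.List.foldl_append_singleton_eq_map, List.nil_append, List.length_map, hcast,
    PySem.List.pyRange_zero_natCast, List.length_range]
  omega

-- ===== PORT B =====
-- B: the while loop; on numbers = [] Python raises IndexError (outside Pre_), here we return numbers.
def search_zeros_alt (numbers : List (List Int)) : List (List Int) :=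
  match h : numbers.getLast? with
  | none => numbers
  | some last =>
    if last.all (fun num => num == 0) then numbers
    else search_zeros_alt (numbers ++ [List.zipWith (fun a b => b - a) last (last.drop 1)])
termination_by (numbers.getLast?.getD []).length
decreasing_by
  have hne : last ≠ [] := by rintro rfl; simp_all
  have h1 : 1 ≤ last.length := List.length_pos_of_ne_nil hne
  simp only [List.getLast?_append, List.getLast?_singleton, Option.some_or, Option.getD_some, h,
    List.length_zipWith, List.length_drop]
  omega

-- ===== PRECONDITION & SPEC =====
-- Pre_: Python A raises IndexError (numbers[-1]) on the empty list; excluded.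
def Pre_search_zeros (numbers : List (List Int)) : Prop := numbers ≠ []
instance (numbers : List (List Int)) : Decidable (Pre_search_zeros numbers) := by
  unfold Pre_search_zeros; infer_instance
def pvWitness_search_zeros : List (List Int) := [[1, 3, 6, 10]]

def Spec_search_zeros (numbers : List (List Int)) (out : List (List Int)) : Prop := out = search_zeros_alt numbers
instance (numbers : List (List Int)) (out : List (List Int)) : Decidable (Spec_search_zeros numbers out) := by unfold Spec_search_zeros; infer_instance

-- ===== CLAIM (what is proved, stated in full; the proofs are below) =====
def Claim_equal_search_zeros : Prop := ∀ (numbers : List (List Int)), Dom_search_zeros numbers → Pre_search_zeros numbers → Spec_search_zeros numbers (search_zeros numbers)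

-- ===== LEMMAS AND PROOFS =====

-- B's zip-built diff row, characterised over List.range (used by both directions below).
theorem rangeDiff_eq (line : List Int) :
    (List.range (line.length - 1)).map (fun k => line.getD (k + 1) 0 - line.getD k 0)
    = List.zipWith (fun a b => b - a) line (line.drop 1) := by
  induction line with
  | nil => simp
  | cons x t ih =>
    cases t with
    | nil => simp
    | cons y t' =>
      simp only [List.length_cons, Nat.add_sub_cancel, List.drop_one, List.tail_cons] at ih ⊢
      rw [List.range_succ_eq_map, List.map_cons, List.map_map]
      simp only [List.zipWith]
      rw [List.cons_eq_cons]
      refine ⟨by simp, ?_⟩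
      rw [← ih]
      apply List.map_congr_left
      intro k _
      simp [Function.comp, Nat.succ_eq_add_one]

-- A's index-built diff row equals B's zip-built diff row.
theorem diffRow_eq (line : List Int) :
    (PySem.List.pyRange 0 ((line.length : Int) - 1) 1).foldl
      (fun acc i => acc ++ [PySem.List.pyGetD line (i + 1) 0 - PySem.List.pyGetD line i 0]) []
    = List.zipWith (fun a b => b - a) line (line.drop 1) := by
  rw [PySem.List.foldl_append_singleton_eq_map, List.nil_append]
  cases line with
  | nil => simp [PySem.List.pyRange]
  | cons x t =>
    have hlen : ((x :: t).length : Int) - 1 = ((t.length : Nat) : Int) := by simp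
    rw [hlen, PySem.List.pyRange_zero_natCast, List.map_map]
    rw [← rangeDiff_eq (x :: t)]
    simp only [List.length_cons, Nat.add_sub_cancel]
    apply List.map_congr_left
    intro k _
    simp only [Function.comp]
    have e1 : ((k : Int) + 1) = (((k + 1 : Nat)) : Int) := by push_cast; ring
    rw [e1, PySem.List.pyGetD_natCast, PySem.List.pyGetD_natCast]

theorem search_zeros_eq_alt_aux :
    ∀ (n : Nat) (numbers : List (List Int)), (numbers.getLast?.getD []).length < n →
      search_zeros numbers = search_zeros_alt numbers := by
  intro n
  induction n with
  | zero => intro numbers h; omega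
  | succ n ih =>
    intro numbers hlt
    rw [search_zeros.eq_def, search_zeros_alt.eq_def]
    cases hg : numbers.getLast? with
    | none => rfl
    | some line =>
      rw [hg] at hlt
      simp only [Option.getD_some] at hlt
      by_cases hz : (line.all fun num => num == 0) = true
      · simp only [hz, if_true]
      · simp only [hz]
        rw [diffRow_eq line]
        apply ih
        rw [List.getLast?_append, List.getLast?_singleton, Option.some_or, Option.getD_some,
          List.length_zipWith, List.length_drop]
        have hne : line ≠ [] := by rintro rfl; simp at hz
        have h1 : 1 ≤ line.length := List.length_pos_of_ne_nil hne
        omega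

theorem search_zeros_eq_alt (numbers : List (List Int)) :
    search_zeros numbers = search_zeros_alt numbers :=
  search_zeros_eq_alt_aux ((numbers.getLast?.getD []).length + 1) numbers (by omega)

-- ===== VERDICT (by name: the statement is the Claim_ definition above) =====
theorem search_zeros_spec : Claim_equal_search_zeros := by
  intro numbers _ _
  unfold Spec_search_zeros
  exact search_zeros_eq_alt numbers
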